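-- pv_equiv track=rewrite | github.com/NatiYoni/A2SV-Competitive-Programming | 13-Feb-2025/Sort The Students By Their Kth Score 261860.py | sortTheStudents
-- ===== SOURCE A (Python) =====
-- from typing import List
--
-- def sortTheStudents(score: List[List[int]], k: int) -> List[List[int]]:
--     map_ = {}
--     for i in range(len(score)):
--         map_[i] = score[i][k]
--
--     sorted_map = dict(sorted(map_.items() ,key = lambda item: item[1], reverse=True))
--     output = []
--
--     for key in sorted_map.keys():
--         output.append(score[key])
--
--     return output
-- ===== SOURCE B (Python) =====
-- from typing import List
--
-- def sortTheStudents(score: List[List[int]], k: int) -> List[List[int]]: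
--     # Incremental stable insertion sort: maintain a descending-by-kth-score
--     # prefix; each new row is inserted after all rows with kth score >= its own,
--     # which preserves original order among ties. No library sort, no dict.
--     out = []
--     for row in score:
--         i = 0
--         while i < len(out) and out[i][k] >= row[k]:
--             i += 1
--         out.insert(i, row)
--     return out
-- ===== Notes on version B (the rewrite author's own statement) =====
-- stated objective: alternative
-- what changed: Replaces A's index-to-score dict, library sort of the dict items and gather loop by a hand-rolled stable insertion sort that maintains a descending sorted prefix and inserts each row after all rows with an equal-or-higher kth score.
import Mathlib
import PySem

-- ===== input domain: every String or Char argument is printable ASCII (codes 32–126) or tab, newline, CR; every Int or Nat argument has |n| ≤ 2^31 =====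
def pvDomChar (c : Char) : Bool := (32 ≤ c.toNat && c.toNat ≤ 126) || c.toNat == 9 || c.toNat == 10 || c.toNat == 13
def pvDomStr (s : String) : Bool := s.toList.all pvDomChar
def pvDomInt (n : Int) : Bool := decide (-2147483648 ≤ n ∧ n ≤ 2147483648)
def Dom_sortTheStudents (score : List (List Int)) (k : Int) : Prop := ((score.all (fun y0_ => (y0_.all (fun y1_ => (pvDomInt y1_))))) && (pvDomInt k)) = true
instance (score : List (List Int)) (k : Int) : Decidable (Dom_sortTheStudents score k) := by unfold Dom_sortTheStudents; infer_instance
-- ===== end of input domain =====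

-- B replaces A's index dict + items-sort + gather loop by a hand-rolled stable insertion sort of the rows (alternative algorithm; same result).


-- ===== PORT A =====
-- map_[i] = score[i][k]; sorted_map = dict(sorted(map_.items(), key=item.2, reverse=True)); output gathers score[key].
def sortTheStudents (score : List (List Int)) (k : Int) : List (List Int) :=
  let map_ : PySem.Dict Int Int :=
    (PySem.List.pyRange 0 (PySem.List.len score) 1).foldl
      (fun d i => d.insert i (PySem.List.pyGetD (PySem.List.pyGetD score i []) k 0)) PySem.Dict.empty
  let sorted_map : PySem.Dict Int Int :=
    PySem.Dict.ofList (PySem.List.sorted map_.items (fun item => item.2) true)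
  sorted_map.keys.foldl (fun output key => output ++ [PySem.List.pyGetD score key []]) []

-- ===== PORT B =====
-- the `while i < len(out) and out[i][k] >= row[k]` scan followed by `out.insert(i, row)`:
-- walk past rows whose kth score is >= row's, place row there.
def insertRowDesc (k : Int) (row : List Int) : List (List Int) → List (List Int)
  | [] => [row]
  | y :: ys =>
      if PySem.List.pyGetD row k 0 ≤ PySem.List.pyGetD y k 0 then y :: insertRowDesc k row ys
      else row :: y :: ys

def sortTheStudents_alt (score : List (List Int)) (k : Int) : List (List Int) :=
  score.foldl (fun out row => insertRowDesc k row out) []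

-- ===== PRECONDITION & SPEC =====
-- Pre_ excludes exactly the inputs where the Python A raises IndexError: some row has no k-th element.
def Pre_sortTheStudents (score : List (List Int)) (k : Int) : Prop :=
  ∀ row ∈ score, PySem.Raise.InRange row.length k
instance (score : List (List Int)) (k : Int) : Decidable (Pre_sortTheStudents score k) := by
  unfold Pre_sortTheStudents PySem.Raise.InRange; infer_instance
def pvWitness_sortTheStudents : List (List Int) × Int := ([[10, 6, 9, 1], [7, 5, 11, 2], [4, 8, 3, 15]], 2)

def Spec_sortTheStudents (score : List (List Int)) (k : Int) (out : List (List Int)) : Prop := out = sortTheStudents_alt score k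
instance (score : List (List Int)) (k : Int) (out : List (List Int)) : Decidable (Spec_sortTheStudents score k out) := by unfold Spec_sortTheStudents; infer_instance

-- ===== CLAIM (what is proved, stated in full; the proofs are below) =====
def Claim_equal_sortTheStudents : Prop := ∀ (score : List (List Int)) (k : Int), Dom_sortTheStudents score k → Pre_sortTheStudents score k → Spec_sortTheStudents score k (sortTheStudents score k)

-- ===== LEMMAS AND PROOFS =====

-- B's insertion step is PySem's insertBy with the descending comparison.
theorem insertRowDesc_eq_insertBy (k : Int) (row : List Int) (ys : List (List Int)) :
    insertRowDesc k row ys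
      = PySem.List.insertBy
          (fun a b => decide (PySem.List.pyGetD b k 0 < PySem.List.pyGetD a k 0)) row ys := by
  induction ys with
  | nil => simp [insertRowDesc, PySem.List.insertBy]
  | cons y ys ih =>
    simp only [insertRowDesc, PySem.List.insertBy, ih]
    by_cases h : PySem.List.pyGetD row k 0 ≤ PySem.List.pyGetD y k 0
    · simp [h, not_lt.mpr h]
    · simp [h, lt_of_not_ge h]

-- B is the PySem stable reverse key-sort of the rows.
theorem alt_eq_sorted (score : List (List Int)) (k : Int) :
    sortTheStudents_alt score k
      = PySem.List.sorted score (fun row => PySem.List.pyGetD row k 0) true := by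
  rw [PySem.List.sorted_rev_eq_foldl_insertBy, sortTheStudents_alt]
  have h : (fun (out : List (List Int)) row => insertRowDesc k row out)
      = (fun acc x => PySem.List.insertBy
          (fun a b => decide (PySem.List.pyGetD b k 0 < PySem.List.pyGetD a k 0)) x acc) := by
    funext out row; exact insertRowDesc_eq_insertBy k row out
  rw [h]

-- Folding `insert` over pairs whose keys are fresh and pairwise distinct appends the pairs to the items.
theorem items_foldl_insert_fresh {ν : Type} (l : List (Int × ν)) (d : PySem.Dict Int ν)
    (hnd : (l.map Prod.fst).Nodup) (hf : ∀ p ∈ l, d.contains p.1 = false) :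
    (l.foldl (fun acc p => acc.insert p.1 p.2) d).items = d.items ++ l := by
  induction l generalizing d with
  | nil => simp
  | cons p rest ih =>
    simp only [List.foldl_cons]
    have hc : d.contains p.1 = false := hf p (List.mem_cons_self)
    have hins : (d.insert p.1 p.2).items = d.items ++ [p] := by
      simp [PySem.Dict.insert, hc]
    have hnd' : (rest.map Prod.fst).Nodup := by
      simpa using hnd.of_cons
    have hf' : ∀ q ∈ rest, (d.insert p.1 p.2).contains q.1 = false := by
      intro q hq
      have hne : p.1 ≠ q.1 := by
        intro h
        exact (List.nodup_cons.mp hnd).1 (List.mem_map.mpr ⟨q, hq, h.symm⟩)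
      have hdq : d.contains q.1 = false := hf q (List.mem_cons_of_mem _ hq)
      simp only [PySem.Dict.contains, hins, List.any_append, List.any_cons, List.any_nil] at hdq ⊢
      simp [hdq, hne]
    rw [ih _ hnd' hf', hins, List.append_assoc]
    rfl

-- insertBy commutes with map when the comparison factors through the map.
theorem map_insertBy {α β : Type} (f : α → β) (bef : α → α → Bool) (bef' : β → β → Bool)
    (h : ∀ a b, bef' (f a) (f b) = bef a b) (x : α) (ys : List α) :
    (PySem.List.insertBy bef x ys).map f = PySem.List.insertBy bef' (f x) (ys.map f) := by
  induction ys with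
  | nil => simp [PySem.List.insertBy]
  | cons y ys ih =>
    simp only [PySem.List.insertBy, List.map_cons, h]
    by_cases hb : bef x y = true
    · simp [hb]
    · simp only [hb, if_neg, Bool.not_eq_true] at *
      simp [ih]

-- A stable key-sort of a mapped list is the map of the sort by the composed key.
theorem sorted_map_comm {α β κ : Type} [LinearOrder κ] (f : α → β) (key : β → κ)
    (xs : List α) (rev : Bool) :
    PySem.List.sorted (xs.map f) key rev = (PySem.List.sorted xs (fun x => key (f x)) rev).map f := by
  cases rev with
  | false =>
    rw [PySem.List.sorted_eq_foldl_insertBy, PySem.List.sorted_eq_foldl_insertBy]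
    have : ∀ (acc : List α),
        (xs.map f).foldl (fun acc y => PySem.List.insertBy (fun a b => decide (key a < key b)) y acc) (acc.map f)
          = (xs.foldl (fun acc x => PySem.List.insertBy (fun a b => decide (key (f a) < key (f b))) x acc) acc).map f := by
      induction xs with
      | nil => intro acc; simp
      | cons x xs ih =>
        intro acc
        simp only [List.map_cons, List.foldl_cons]
        rw [← map_insertBy f _ _ (fun a b => rfl) x acc, ih]
    simpa using this []
  | true =>
    rw [PySem.List.sorted_rev_eq_foldl_insertBy, PySem.List.sorted_rev_eq_foldl_insertBy]
    have : ∀ (acc : List α),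
        (xs.map f).foldl (fun acc y => PySem.List.insertBy (fun a b => decide (key b < key a)) y acc) (acc.map f)
          = (xs.foldl (fun acc x => PySem.List.insertBy (fun a b => decide (key (f b) < key (f a))) x acc) acc).map f := by
      induction xs with
      | nil => intro acc; simp
      | cons x xs ih =>
        intro acc
        simp only [List.map_cons, List.foldl_cons]
        rw [← map_insertBy f _ _ (fun a b => rfl) x acc, ih]
    simpa using this []

-- Variant of items_foldl_insert_fresh for a loop inserting (i, v i) over a fresh nodup key list.
theorem items_foldl_insert_fresh' {ν : Type} (l : List Int) (v : Int → ν) (d : PySem.Dict Int ν)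
    (hnd : l.Nodup) (hf : ∀ i ∈ l, d.contains i = false) :
    (l.foldl (fun d i => d.insert i (v i)) d).items = d.items ++ l.map (fun i => (i, v i)) := by
  have h := items_foldl_insert_fresh (l.map (fun i => (i, v i))) d
    (by simpa [List.map_map, Function.comp_def] using hnd)
    (by intro p hp; obtain ⟨i, hi, rfl⟩ := List.mem_map.mp hp; exact hf i hi)
  rw [List.foldl_map] at h
  exact h

-- ===== VERDICT (by name: the statement is the Claim_ definition above) =====
theorem sortTheStudents_spec : Claim_equal_sortTheStudents := by
  intro score k _ _
  unfold Spec_sortTheStudents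
  rw [alt_eq_sorted]
  unfold sortTheStudents
  show ((PySem.Dict.ofList (PySem.List.sorted
      ((PySem.List.pyRange 0 (PySem.List.len score) 1).foldl
        (fun d i => d.insert i (PySem.List.pyGetD (PySem.List.pyGetD score i []) k 0)) PySem.Dict.empty).items
      (fun item => item.2) true)).keys).foldl
      (fun output key => output ++ [PySem.List.pyGetD score key []]) []
    = PySem.List.sorted score (fun row => PySem.List.pyGetD row k 0) true
  have hmap : ((PySem.List.pyRange 0 (PySem.List.len score) 1).foldl
      (fun d i => d.insert i (PySem.List.pyGetD (PySem.List.pyGetD score i []) k 0)) PySem.Dict.empty).items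
      = (PySem.List.pyRange 0 (PySem.List.len score) 1).map
          (fun i => (i, PySem.List.pyGetD (PySem.List.pyGetD score i []) k 0)) := by
    rw [items_foldl_insert_fresh' _ _ _ (PySem.List.nodup_pyRange_one 0 _)
      (fun i _ => by simp [PySem.Dict.empty, PySem.Dict.contains])]
    simp [PySem.Dict.empty]
  rw [hmap]
  have hperm : (PySem.List.sorted
      ((PySem.List.pyRange 0 (PySem.List.len score) 1).map
        (fun i => (i, PySem.List.pyGetD (PySem.List.pyGetD score i []) k 0)))
      (fun item => item.2) true).Perm
      ((PySem.List.pyRange 0 (PySem.List.len score) 1).map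
        (fun i => (i, PySem.List.pyGetD (PySem.List.pyGetD score i []) k 0))) :=
    PySem.List.sorted_perm _ _ _
  have hLnodup : ((PySem.List.sorted
      ((PySem.List.pyRange 0 (PySem.List.len score) 1).map
        (fun i => (i, PySem.List.pyGetD (PySem.List.pyGetD score i []) k 0)))
      (fun item => item.2) true).map Prod.fst).Nodup := by
    refine ((hperm.map Prod.fst).nodup_iff).mpr ?_
    simpa [List.map_map, Function.comp_def] using PySem.List.nodup_pyRange_one 0 (PySem.List.len score)
  have hkeys : (PySem.Dict.ofList (PySem.List.sorted
      ((PySem.List.pyRange 0 (PySem.List.len score) 1).map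
        (fun i => (i, PySem.List.pyGetD (PySem.List.pyGetD score i []) k 0)))
      (fun item => item.2) true)).keys
      = (PySem.List.sorted
      ((PySem.List.pyRange 0 (PySem.List.len score) 1).map
        (fun i => (i, PySem.List.pyGetD (PySem.List.pyGetD score i []) k 0)))
      (fun item => item.2) true).map Prod.fst := by
    show (List.foldl (fun (acc : PySem.Dict Int Int) (p : Int × Int) => acc.insert p.1 p.2)
      PySem.Dict.empty (PySem.List.sorted
      ((PySem.List.pyRange 0 (PySem.List.len score) 1).map
        (fun i => (i, PySem.List.pyGetD (PySem.List.pyGetD score i []) k 0)))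
      (fun item => item.2) true)).items.map Prod.fst = _
    rw [items_foldl_insert_fresh _ PySem.Dict.empty hLnodup
      (fun p _ => by simp [PySem.Dict.empty, PySem.Dict.contains])]
    simp [PySem.Dict.empty]
  rw [hkeys, PySem.List.foldl_append_singleton_eq_map (fun key => PySem.List.pyGetD score key []),
    List.nil_append, List.map_map]
  rw [sorted_map_comm (fun i => (i, PySem.List.pyGetD (PySem.List.pyGetD score i []) k 0))
    (fun item => item.2) (PySem.List.pyRange 0 (PySem.List.len score) 1) true]
  rw [List.map_map]
  have hmapF : (PySem.List.pyRange 0 (PySem.List.len score) 1).map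
      (fun j => PySem.List.pyGetD score j []) = score := PySem.List.map_pyGetD_pyRange_zero score []
  calc ((PySem.List.sorted (PySem.List.pyRange 0 (PySem.List.len score) 1)
          (fun i => PySem.List.pyGetD (PySem.List.pyGetD score i []) k 0) true).map
          ((fun key => PySem.List.pyGetD score key []) ∘ Prod.fst ∘
            (fun i => (i, PySem.List.pyGetD (PySem.List.pyGetD score i []) k 0))))
      = (PySem.List.sorted (PySem.List.pyRange 0 (PySem.List.len score) 1)
          (fun i => (fun row => PySem.List.pyGetD row k 0) (PySem.List.pyGetD score i [])) true).map
          (fun i => PySem.List.pyGetD score i []) := rfl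
    _ = PySem.List.sorted ((PySem.List.pyRange 0 (PySem.List.len score) 1).map
          (fun i => PySem.List.pyGetD score i [])) (fun row => PySem.List.pyGetD row k 0) true :=
        (sorted_map_comm (fun i => PySem.List.pyGetD score i [])
          (fun row => PySem.List.pyGetD row k 0) _ true).symm
    _ = PySem.List.sorted score (fun row => PySem.List.pyGetD row k 0) true := by rw [hmapF]
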